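-- pv_equiv track=rewrite | github.com/nerel-ds/NEREL-BIO | nested-mcn/nelbio/training/train_nested_mlp_reranker_frozen_biosyn.py | create_nested_entity_flat_index
-- ===== SOURCE A (Python) =====
-- from typing import List
--
-- def create_nested_entity_flat_index(nested_entities: List[List[str]]):
--     index = []
--     start_pos = 0
--     for nested_e_id, n_e in enumerate(nested_entities):
--         depth = len(n_e)
--
--         end_pos = start_pos + depth
--         index.append((start_pos, end_pos))
--         start_pos += depth
--     return index
-- ===== SOURCE B (Python) =====
-- from itertools import accumulate
-- from typing import List
--
-- def create_nested_entity_flat_index(nested_entities: List[List[str]]):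
--     depths = [len(n_e) for n_e in nested_entities]
--     bounds = list(accumulate(depths, initial=0))
--     return [(s, e) for s, e in zip(bounds, bounds[1:])]
-- ===== Notes on version B (the rewrite author's own statement) =====
-- stated objective: idiomatic
-- what changed: Two-phase boundary table: compute cumulative boundaries with itertools.accumulate and pair adjacent boundaries with zip, instead of maintaining a running start_pos inside one appending loop.
import Mathlib
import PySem

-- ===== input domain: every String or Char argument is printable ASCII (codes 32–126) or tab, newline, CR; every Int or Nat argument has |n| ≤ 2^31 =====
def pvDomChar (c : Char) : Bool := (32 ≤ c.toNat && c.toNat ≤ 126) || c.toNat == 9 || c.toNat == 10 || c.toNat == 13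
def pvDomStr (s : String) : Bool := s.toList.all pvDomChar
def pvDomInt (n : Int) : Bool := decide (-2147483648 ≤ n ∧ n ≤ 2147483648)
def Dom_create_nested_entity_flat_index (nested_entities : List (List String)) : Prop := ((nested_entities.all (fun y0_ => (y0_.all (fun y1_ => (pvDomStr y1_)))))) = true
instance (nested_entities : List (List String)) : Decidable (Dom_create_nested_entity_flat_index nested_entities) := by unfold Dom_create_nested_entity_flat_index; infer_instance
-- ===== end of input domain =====

-- B replaces A's single running-start_pos loop with a two-phase boundary table (accumulate + zip pairing); objective: idiomatic, same cost.


-- ===== PORT A =====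
-- literal port of A: one loop appending (start_pos, start_pos + depth) and advancing start_pos
def create_nested_entity_flat_index (nested_entities : List (List String)) : List (Int × Int) :=
  (nested_entities.foldl
    (fun (st : List (Int × Int) × Int) n_e =>
      let depth : Int := (n_e.length : Int)
      let end_pos := st.2 + depth
      (st.1 ++ [(st.2, end_pos)], st.2 + depth))
    ([], 0)).1

-- ===== PORT B =====
-- port of B: boundary table via scanl (= accumulate with initial=0), then zip with its tail
def create_nested_entity_flat_index_alt (nested_entities : List (List String)) : List (Int × Int) :=
  let depths : List Int := nested_entities.map (fun n_e => (n_e.length : Int))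
  let bounds : List Int := depths.scanl (· + ·) 0
  (bounds.zip bounds.tail)

-- ===== PRECONDITION & SPEC =====
def Spec_create_nested_entity_flat_index (nested_entities : List (List String)) (out : List (Int × Int)) : Prop := out = create_nested_entity_flat_index_alt nested_entities
instance (nested_entities : List (List String)) (out : List (Int × Int)) : Decidable (Spec_create_nested_entity_flat_index nested_entities out) := by unfold Spec_create_nested_entity_flat_index; infer_instance

-- ===== CLAIM (what is proved, stated in full; the proofs are below) =====
def Claim_equal_create_nested_entity_flat_index : Prop := ∀ (nested_entities : List (List String)), Dom_create_nested_entity_flat_index nested_entities → Spec_create_nested_entity_flat_index nested_entities (create_nested_entity_flat_index nested_entities)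

-- ===== LEMMAS AND PROOFS =====

lemma flat_index_loop (nes : List (List String)) : ∀ (acc : List (Int × Int)) (s : Int),
    (nes.foldl
      (fun (st : List (Int × Int) × Int) n_e =>
        let depth : Int := (n_e.length : Int)
        let end_pos := st.2 + depth
        (st.1 ++ [(st.2, end_pos)], st.2 + depth))
      (acc, s)).1
    = acc ++ ((nes.map (fun n_e => (n_e.length : Int))).scanl (· + ·) s).zip
             (((nes.map (fun n_e => (n_e.length : Int))).scanl (· + ·) s).tail) := by
  induction nes with
  | nil => intro acc s; simp [List.scanl]
  | cons h t ih =>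
      intro acc s
      simp only [List.foldl_cons, List.map_cons, List.scanl]
      rw [ih]
      cases ht : t.map (fun n_e => (n_e.length : Int)) with
      | nil => simp [List.scanl]
      | cons d ds => simp [List.scanl, List.zip]

-- ===== VERDICT (by name: the statement is the Claim_ definition above) =====
theorem create_nested_entity_flat_index_spec : Claim_equal_create_nested_entity_flat_index := by
  intro nes _
  unfold Spec_create_nested_entity_flat_index create_nested_entity_flat_index create_nested_entity_flat_index_alt
  rw [flat_index_loop nes [] 0]
  simp
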